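-- pv_equiv track=rewrite | github.com/alecthomas/porpoise | porpoise.py | bitset
-- ===== SOURCE A (Python) =====
-- def bitset(value):
--     bits = set()
--     if value is None:
--         return bits
--     i = 0
--     for c in value:
--         for j in range(8):
--             if ord(c) & (1 << (7 - j)):
--                 bits.add(i)
--             i += 1
--     return bits
-- ===== SOURCE B (Python) =====
-- def bitset(value):
--     bits = set()
--     if value is None:
--         return bits
--     n = 0
--     for c in value:
--         n = (n << 8) | (ord(c) & 0xFF)
--     total = 8 * len(value)
--     while n:
--         k = n.bit_length() - 1
--         bits.add(total - 1 - k)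
--         n ^= 1 << k
--     return bits
-- ===== Notes on version B (the rewrite author's own statement) =====
-- stated objective: alternative
-- what changed: A scans all 8 bit positions of every byte with two nested loops; B packs the whole byte string into one big integer and emits only its set bits, repeatedly taking the highest set bit via bit_length and clearing it with xor.
import Mathlib
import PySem

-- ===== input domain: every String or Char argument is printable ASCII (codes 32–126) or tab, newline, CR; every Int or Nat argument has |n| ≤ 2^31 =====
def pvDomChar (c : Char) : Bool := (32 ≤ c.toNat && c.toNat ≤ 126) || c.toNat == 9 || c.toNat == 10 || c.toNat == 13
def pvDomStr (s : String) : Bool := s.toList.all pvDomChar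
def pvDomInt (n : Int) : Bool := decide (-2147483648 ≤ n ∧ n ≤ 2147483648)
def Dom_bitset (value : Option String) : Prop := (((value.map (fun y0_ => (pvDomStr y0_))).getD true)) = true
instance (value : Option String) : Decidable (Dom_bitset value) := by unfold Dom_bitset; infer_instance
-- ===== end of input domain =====

-- B replaces A's per-char scan of all 8 bit positions by packing the bytes into one big
-- integer and emitting only its set bits, highest bit first (objective: alternative algorithm).

-- ===== PORT A =====
-- A scans each char's 8 bits MSB-first, adding the running index i when the bit is set.
-- `for j in range(8)` is ported as a fold over List.range 8 (the same values 0,…,7).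
def bitset (value : Option String) : List Int :=
  match value with
  | none => PySem.Set.empty
  | some s =>
    (s.toList.foldl
      (fun (st : PySem.Set Int × Int) c =>
        (List.range 8).foldl
          (fun (st : PySem.Set Int × Int) j =>
            ((if (c.toNat &&& (1 <<< (7 - j))) != 0 then PySem.Set.add st.1 st.2 else st.1),
             st.2 + 1))
          st)
      (PySem.Set.empty, 0)).1

-- ===== PORT B =====
-- the `while n:` loop of Source B; `fuel` only makes it total (each iteration clears the top
-- set bit, so n strictly decreases, and the top-level call passes fuel = n, which suffices).
-- `n.bit_length() - 1` for n > 0 is Nat.log2 n; `n ^= 1 << k` is the xor below.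
def pvExtract : Nat → Nat → Nat → List Int
  | 0, _, _ => []
  | fuel+1, n, total =>
    if n = 0 then []
    else
      ((total : Int) - 1 - (Nat.log2 n : Int)) ::
        pvExtract fuel (n ^^^ (1 <<< Nat.log2 n)) total

-- the positions are produced strictly increasing, hence distinct: the list built by
-- consing IS the set Source B builds with bits.add.
def bitset_alt (value : Option String) : List Int :=
  match value with
  | none => []
  | some s =>
    let n := s.toList.foldl (fun n c => (n <<< 8) ||| (c.toNat &&& 255)) 0
    pvExtract n n (8 * s.toList.length)

-- ===== PRECONDITION & SPEC =====
def Spec_bitset (value : Option String) (out : List Int) : Prop := out = bitset_alt value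
instance (value : Option String) (out : List Int) : Decidable (Spec_bitset value out) := by unfold Spec_bitset; infer_instance

-- ===== CLAIM (what is proved, stated in full; the proofs are below) =====
def Claim_equal_bitset : Prop := ∀ (value : Option String), Dom_bitset value → Spec_bitset value (bitset value)

-- ===== LEMMAS AND PROOFS =====

-- the set-bit positions of one byte, MSB first (A's inner loop reads them in this order)
def pvByteBits (b : Nat) : List Nat :=
  (List.range 8).filter (fun j => (b &&& (1 <<< (7 - j))) != 0)

-- the common specification: positions contributed by each char, chars left to right
def pvF : List Char → Int → List Int
  | [], _ => []
  | c :: cs, i => (pvByteBits c.toNat).map (fun j : Nat => i + (j : Int)) ++ pvF cs (i + 8)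

-- canonical extraction (fuel = value)
def pvE (n total : Nat) : List Int := pvExtract n n total

-- the accumulated big integer of Source B
def pvN (cs : List Char) : Nat := cs.foldl (fun n c => (n <<< 8) ||| (c.toNat &&& 255)) 0

theorem pv_add_append (s : List Int) (x : Int) (h : ∀ y ∈ s, y < x) :
    PySem.Set.add s x = s ++ [x] := by
  have hx : x ∉ s := fun hm => lt_irrefl x (h x hm)
  simp [PySem.Set.add, PySem.Set.contains, hx]


theorem pv_inner (b : Nat) :
    ∀ (m jj : Nat) (s : List Int) (i : Int), (∀ x ∈ s, x < i) →
    (List.range' jj m).foldl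
      (fun (st : PySem.Set Int × Int) j =>
        ((if (b &&& (1 <<< (7 - j))) != 0 then PySem.Set.add st.1 st.2 else st.1), st.2 + 1))
      (s, i)
    = (s ++ ((List.range' jj m).filter (fun j => (b &&& (1 <<< (7 - j))) != 0)).map
          (fun t : Nat => i + (t : Int) - (jj : Int)), i + m) := by
  intro m
  induction m with
  | zero => intro jj s i h; simp [List.range']
  | succ m IH =>
    intro jj s i h
    rw [List.range'_succ]
    simp only [List.foldl_cons, List.filter_cons]
    by_cases hc : ((b &&& (1 <<< (7 - jj))) != 0) = true
    · rw [if_pos hc, if_pos hc, pv_add_append s i h]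
      have h' : ∀ x ∈ s ++ [i], x < i + 1 := by
        intro x hx
        rcases List.mem_append.mp hx with hx | hx
        · have := h x hx; omega
        · simp at hx; omega
      rw [IH (jj + 1) (s ++ [i]) (i + 1) h']
      simp only [Prod.mk.injEq]
      refine ⟨?_, by push_cast; ring⟩
      rw [List.append_assoc, List.map_cons, List.singleton_append]
      congr 1
      congr 1
      · ring
      · apply List.map_congr_left
        intro t _
        push_cast; ring
    · rw [if_neg hc, if_neg hc]
      have h' : ∀ x ∈ s, x < i + 1 := fun x hx => by have := h x hx; omega
      rw [IH (jj + 1) s (i + 1) h']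
      simp only [Prod.mk.injEq]
      refine ⟨?_, by push_cast; ring⟩
      congr 1
      apply List.map_congr_left
      intro t _
      push_cast; ring

theorem pv_outer (cs : List Char) :
    ∀ (s : List Int) (i : Int), (∀ x ∈ s, x < i) →
    cs.foldl
      (fun (st : PySem.Set Int × Int) c =>
        (List.range 8).foldl
          (fun (st : PySem.Set Int × Int) j =>
            ((if (c.toNat &&& (1 <<< (7 - j))) != 0 then PySem.Set.add st.1 st.2 else st.1),
             st.2 + 1))
          st)
      (s, i)
    = (s ++ pvF cs i, i + 8 * cs.length) := by
  induction cs with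
  | nil => intro s i h; simp [pvF]
  | cons c cs IH =>
    intro s i h
    simp only [List.foldl_cons]
    have hInner := pv_inner c.toNat 8 0 s i h
    rw [← List.range_eq_range'] at hInner
    rw [hInner]
    have h' : ∀ x ∈ s ++ ((List.range 8).filter
        (fun j => (c.toNat &&& (1 <<< (7 - j))) != 0)).map
          (fun t : Nat => i + (t : Int) - ((0 : Nat) : Int)), x < i + ((8 : Nat) : Int) := by
      intro x hx
      rcases List.mem_append.mp hx with hx | hx
      · have := h x hx; push_cast; omega
      · obtain ⟨t, ht, rfl⟩ := List.mem_map.mp hx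
        have ht' : t < 8 := List.mem_range.mp (List.mem_of_mem_filter ht)
        push_cast
        omega
    rw [IH _ _ h']
    simp only [Prod.mk.injEq]
    constructor
    · rw [List.append_assoc]
      congr 1
      simp only [pvF, pvByteBits]
      congr 1
      · apply List.map_congr_left
        intro t _
        push_cast; ring
    · simp only [List.length_cons]
      push_cast; ring

theorem pv_or_add (a b : Nat) (hb : b < 256) : (a <<< 8) ||| b = a * 256 + b := by
  apply Nat.eq_of_testBit_eq
  intro i
  have h256 : a * 256 + b = 2 ^ 8 * a + b := by ring
  rw [h256, Nat.testBit_lor, Nat.testBit_shiftLeft, Nat.testBit_two_pow_mul_add a hb]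
  by_cases hi : i < 8
  · simp [hi, Nat.not_le.mpr hi]
  · have hb' : b.testBit i = false :=
      Nat.testBit_lt_two_pow (lt_of_lt_of_le hb (Nat.pow_le_pow_right (by norm_num : 0 < 2) (Nat.not_lt.mp hi)))
    simp [hi, Nat.not_lt.mp hi, hb']


theorem pv_N_aux (cs : List Char) : ∀ a : Nat,
    cs.foldl (fun n c => (n <<< 8) ||| (c.toNat &&& 255)) a
      = a * 2 ^ (8 * cs.length) + pvN cs := by
  induction cs with
  | nil => intro a; simp [pvN]
  | cons c cs IH =>
    intro a
    have hb : c.toNat &&& 255 < 256 := by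
      have := Nat.and_le_right (n := c.toNat) (m := 255); omega
    show List.foldl _ ((a <<< 8) ||| (c.toNat &&& 255)) cs = _
    rw [IH, pv_or_add _ _ hb]
    have hN : pvN (c :: cs) = (c.toNat &&& 255) * 2 ^ (8 * cs.length) + pvN cs := by
      show List.foldl _ ((0 <<< 8) ||| (c.toNat &&& 255)) cs = _
      rw [IH, pv_or_add _ _ hb]
      norm_num
    rw [hN]
    rw [show 8 * (c :: cs).length = 8 * cs.length + 8 by simp [List.length_cons]; ring,
        pow_add]
    ring

theorem pv_N_cons (c : Char) (cs : List Char) :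
    pvN (c :: cs) = (c.toNat &&& 255) * 2 ^ (8 * cs.length) + pvN cs := by
  have hb : c.toNat &&& 255 < 256 := by
    have := Nat.and_le_right (n := c.toNat) (m := 255); omega
  show List.foldl _ ((0 <<< 8) ||| (c.toNat &&& 255)) cs = _
  rw [pv_N_aux, pv_or_add _ _ hb]
  norm_num


theorem pv_N_lt (cs : List Char) : pvN cs < 2 ^ (8 * cs.length) := by
  induction cs with
  | nil => simp [pvN]
  | cons c cs IH =>
    rw [pv_N_cons]
    have hb : c.toNat &&& 255 ≤ 255 := Nat.and_le_right
    have hpow : 2 ^ (8 * (c :: cs).length) = 2 ^ (8 * cs.length) * 256 := by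
      rw [show 8 * (c :: cs).length = 8 * cs.length + 8 by simp [List.length_cons]; ring,
          pow_add]
      norm_num
    rw [hpow]
    calc (c.toNat &&& 255) * 2 ^ (8 * cs.length) + pvN cs
        < (c.toNat &&& 255) * 2 ^ (8 * cs.length) + 2 ^ (8 * cs.length) := by omega
      _ = ((c.toNat &&& 255) + 1) * 2 ^ (8 * cs.length) := by ring
      _ ≤ 256 * 2 ^ (8 * cs.length) := Nat.mul_le_mul_right _ (by omega)
      _ = 2 ^ (8 * cs.length) * 256 := by ring


theorem pv_xor_top (k m : Nat) (hm : m < 2 ^ k) : (2 ^ k + m) ^^^ (1 <<< k) = m := by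
  have hk : (1 : Nat) <<< k = 2 ^ k := Nat.one_shiftLeft k
  apply Nat.eq_of_testBit_eq
  intro i
  have h1 : 2 ^ k + m = 2 ^ k * 1 + m := by ring
  rw [hk, Nat.testBit_xor, h1, Nat.testBit_two_pow_mul_add 1 hm, Nat.testBit_two_pow]
  by_cases hi : i < k
  · have hne : k ≠ i := by omega
    simp [hi, hne]
  · have hmi : m.testBit i = false :=
      Nat.testBit_lt_two_pow (lt_of_lt_of_le hm (Nat.pow_le_pow_right (by norm_num : 0 < 2) (Nat.not_lt.mp hi)))
    by_cases he : i = k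
    · subst he
      simp [hmi]
    · have : (1 : Nat).testBit (i - k) = false := by
        rw [(by norm_num : (1:Nat) = 2 ^ 0), Nat.testBit_two_pow]
        simp; omega
      simp [hi, hmi, this, Ne.symm he]


theorem pv_xor_lt (n : Nat) (hn : n ≠ 0) : n ^^^ (1 <<< Nat.log2 n) < n := by
  have h1 : 2 ^ Nat.log2 n ≤ n := Nat.log2_self_le hn
  have h2 : n < 2 ^ (Nat.log2 n + 1) := Nat.lt_log2_self
  rw [Nat.pow_succ] at h2
  have hm : n - 2 ^ Nat.log2 n < 2 ^ Nat.log2 n := by omega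
  have hd : n = 2 ^ Nat.log2 n + (n - 2 ^ Nat.log2 n) := by omega
  calc n ^^^ (1 <<< Nat.log2 n)
      = (2 ^ Nat.log2 n + (n - 2 ^ Nat.log2 n)) ^^^ (1 <<< Nat.log2 n) := by rw [← hd]
    _ = n - 2 ^ Nat.log2 n := pv_xor_top _ _ hm
    _ < n := by have : 0 < 2 ^ Nat.log2 n := Nat.pow_pos (by norm_num); omega


theorem pv_fuel (fuel n total : Nat) (h : n ≤ fuel) :
    pvExtract fuel n total = pvE n total := by
  induction n using Nat.strong_induction_on generalizing fuel with
  | _ n IH =>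
    by_cases hn : n = 0
    · subst hn; cases fuel <;> simp [pvExtract, pvE]
    · obtain ⟨f, rfl⟩ : ∃ f, fuel = f + 1 := ⟨fuel - 1, by omega⟩
      obtain ⟨m, rfl⟩ : ∃ m, n = m + 1 := ⟨n - 1, by omega⟩
      have hlt := pv_xor_lt (m + 1) hn
      simp only [pvE, pvExtract, if_neg hn]
      congr 1
      rw [IH _ hlt _ (by omega)]
      have hle : (m + 1) ^^^ 1 <<< Nat.log2 (m + 1) ≤ m := by omega
      exact (IH _ hlt m hle).symm


theorem pv_unfold (n total : Nat) (hn : n ≠ 0) :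
    pvE n total = ((total : Int) - 1 - (Nat.log2 n : Int)) ::
      pvE (n ^^^ (1 <<< Nat.log2 n)) total := by
  obtain ⟨m, rfl⟩ := Nat.exists_eq_succ_of_ne_zero hn
  have hlt := pv_xor_lt (m+1) (by omega)
  simp only [pvE, pvExtract, if_neg (by omega : ¬ m+1 = 0)]
  congr 1
  have hle : (m + 1) ^^^ 1 <<< Nat.log2 (m + 1) ≤ m := by omega
  exact pv_fuel m _ _ hle


theorem pv_shift (fuel n t : Nat) :
    pvExtract fuel n (t + 8) = (pvExtract fuel n t).map (fun p => 8 + p) := by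
  induction fuel generalizing n with
  | zero => simp [pvExtract]
  | succ f IH =>
    by_cases hn : n = 0
    · simp [pvExtract, hn]
    · simp only [pvExtract, if_neg hn, IH]
      rw [List.map_cons]
      congr 1
      omega


theorem pv_log2_combined (b t n : Nat) (hb : b ≠ 0) (hn : n < 2 ^ t) :
    Nat.log2 (b * 2 ^ t + n) = t + Nat.log2 b := by
  have hpos : 0 < 2 ^ t := Nat.pow_pos (by norm_num)
  have hbt : 2 ^ t ≤ b * 2 ^ t := Nat.le_mul_of_pos_left _ (Nat.pos_of_ne_zero hb)
  have hN : b * 2 ^ t + n ≠ 0 := by omega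
  have le1 : t + Nat.log2 b ≤ Nat.log2 (b * 2 ^ t + n) := by
    rw [Nat.le_log2 hN]
    calc 2 ^ (t + Nat.log2 b) = 2 ^ t * 2 ^ Nat.log2 b := pow_add 2 t _
      _ ≤ 2 ^ t * b := Nat.mul_le_mul_left _ (Nat.log2_self_le hb)
      _ = b * 2 ^ t := mul_comm _ _
      _ ≤ b * 2 ^ t + n := Nat.le_add_right _ _
  have le2 : Nat.log2 (b * 2 ^ t + n) < t + Nat.log2 b + 1 := by
    rw [Nat.log2_lt hN]
    calc b * 2 ^ t + n < b * 2 ^ t + 2 ^ t := by omega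
      _ = (b + 1) * 2 ^ t := by ring
      _ ≤ 2 ^ (Nat.log2 b + 1) * 2 ^ t := Nat.mul_le_mul_right _ (by
            have := Nat.lt_log2_self (n := b); omega)
      _ = 2 ^ (t + Nat.log2 b + 1) := by rw [← pow_add]; ring_nf
  omega


theorem pv_xor_combined (b k t n : Nat) (hn : n < 2 ^ t) :
    (b * 2 ^ t + n) ^^^ (1 <<< (t + k)) = (b ^^^ (1 <<< k)) * 2 ^ t + n := by
  apply Nat.eq_of_testBit_eq
  intro i
  rw [Nat.testBit_xor, Nat.one_shiftLeft,
      show b * 2 ^ t + n = 2 ^ t * b + n by ring, Nat.testBit_two_pow_mul_add _ hn,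
      show (b ^^^ 1 <<< k) * 2 ^ t + n = 2 ^ t * (b ^^^ 1 <<< k) + n by ring,
      Nat.testBit_two_pow_mul_add _ hn, Nat.testBit_two_pow]
  by_cases hi : i < t
  · have hne : t + k ≠ i := by omega
    simp [hi, hne]
  · simp only [if_neg hi]
    rw [Nat.testBit_xor, Nat.one_shiftLeft, Nat.testBit_two_pow]
    have hiff : (t + k = i) ↔ (k = i - t) := by omega
    simp [hiff]


set_option maxRecDepth 100000 in
theorem pv_byte_head : ∀ b < 256, b ≠ 0 →
    pvByteBits b = (7 - Nat.log2 b) :: pvByteBits (b ^^^ (1 <<< Nat.log2 b)) := by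
  decide


theorem pv_ext : ∀ b, b < 256 →
    ∀ t n, n < 2 ^ t →
    pvE (b * 2 ^ t + n) (t + 8) = (pvByteBits b).map (fun j : Nat => (j : Int)) ++ pvE n (t + 8) := by
  intro b
  induction b using Nat.strong_induction_on with
  | _ b IH =>
    intro hb t n hn
    by_cases hb0 : b = 0
    · subst hb0
      rw [show pvByteBits 0 = [] from by decide]
      simp
    · have hpos : 0 < 2 ^ t := Nat.pow_pos (by norm_num)
      have hbt : 2 ^ t ≤ b * 2 ^ t := Nat.le_mul_of_pos_left _ (Nat.pos_of_ne_zero hb0)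
      have hN : b * 2 ^ t + n ≠ 0 := by omega
      have hk7 : Nat.log2 b ≤ 7 := by
        have := (Nat.log2_lt hb0).mpr (show b < 2 ^ 8 by omega)
        omega
      have hb' : b ^^^ 1 <<< Nat.log2 b < b := pv_xor_lt b hb0
      rw [pv_unfold _ _ hN, pv_log2_combined b t n hb0 hn,
          pv_xor_combined b (Nat.log2 b) t n hn,
          IH _ hb' (by omega) t n hn, pv_byte_head b hb hb0]
      rw [List.map_cons]
      rw [List.cons_append]
      congr 1
      push_cast [hk7]
      omega

theorem pv_F_shift (cs : List Char) : ∀ (d i : Int),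
    pvF cs (d + i) = (pvF cs i).map (fun p => d + p) := by
  induction cs with
  | nil => intro d i; simp [pvF]
  | cons c cs IH =>
    intro d i
    simp only [pvF, List.map_append, List.map_map]
    congr 1
    · apply List.map_congr_left
      intro t _
      simp [Function.comp]
      ring
    · rw [show d + i + 8 = d + (i + 8) by ring, IH d (i + 8)]


set_option maxRecDepth 100000 in
theorem pv_and255 : ∀ x, x < 256 → x &&& 255 = x := by decide

theorem pv_B (cs : List Char) (h : ∀ c ∈ cs, c.toNat < 256) :
    pvE (pvN cs) (8 * cs.length) = pvF cs 0 := by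
  induction cs with
  | nil => simp [pvN, pvE, pvExtract, pvF]
  | cons c cs IH =>
    have hc : c.toNat < 256 := h c (by simp)
    have hrest : ∀ c' ∈ cs, c'.toNat < 256 := fun c' hc' => h c' (by simp [hc'])
    have hb : c.toNat &&& 255 < 256 := by
      have := Nat.and_le_right (n := c.toNat) (m := 255); omega
    have hlen : 8 * (c :: cs).length = 8 * cs.length + 8 := by
      simp [List.length_cons]; ring
    rw [pv_N_cons, hlen, pv_ext _ hb _ _ (pv_N_lt cs)]
    rw [pv_and255 _ hc]
    have hshift : pvE (pvN cs) (8 * cs.length + 8)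
        = (pvE (pvN cs) (8 * cs.length)).map (fun p => 8 + p) := by
      unfold pvE
      exact pv_shift _ _ _
    rw [hshift, IH hrest]
    have hFs := (pv_F_shift cs 8 0).symm
    rw [show (8 : Int) + 0 = 8 by ring] at hFs
    rw [hFs]
    simp only [pvF]
    congr 1
    apply List.map_congr_left
    intro t _
    ring


-- ===== VERDICT (by name: the statement is the Claim_ definition above) =====
theorem bitset_spec : Claim_equal_bitset := by
  intro value hdom
  unfold Spec_bitset
  cases value with
  | none => rfl
  | some s =>
    have hall : ∀ c ∈ s.toList, pvDomChar c = true := by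
      simpa [Dom_bitset, pvDomStr, List.all_eq_true] using hdom
    have hc : ∀ c ∈ s.toList, c.toNat < 256 := by
      intro c hcm
      have := hall c hcm
      simp [pvDomChar] at this
      omega
    show (s.toList.foldl _ ((PySem.Set.empty : PySem.Set Int), (0 : Int))).1 = _
    have hA := pv_outer s.toList [] 0 (by simp)
    rw [show ((PySem.Set.empty : PySem.Set Int), (0 : Int)) = (([] : List Int), (0 : Int)) from rfl,
        hA]
    show [] ++ pvF s.toList 0 = pvE (pvN s.toList) (8 * s.toList.length)
    rw [pv_B s.toList hc]
    simp
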